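-- pv_equiv track=rewrite | github.com/chipi/podcast_scraper | src/podcast_scraper/rss_parser.py | choose_transcript_url
-- ===== SOURCE A (Python) =====
-- from typing import List, Optional, Tuple
--
-- def choose_transcript_url(
--     candidates: List[Tuple[str, Optional[str]]], prefer_types: List[str]
-- ) -> Optional[Tuple[str, Optional[str]]]:
--     """Choose the best transcript URL from candidates based on preferred types.
--
--     Args:
--         candidates: List of (url, type) tuples
--         prefer_types: List of preferred MIME types or file extensions
--
--     Returns:
--         Chosen (url, type) tuple or None
--     """
--     if not candidates:
--         return None
--     if not prefer_types:
--         return candidates[0]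
--
--     lowered = [(u, t.lower() if t else None) for (u, t) in candidates]
--     for pref in prefer_types:
--         p = pref.lower().strip()
--         for idx, (u, t_lower) in enumerate(lowered):
--             orig_url, orig_type = candidates[idx]
--             if (t_lower and p in t_lower) or orig_url.lower().endswith(p):
--                 return orig_url, orig_type
--     return candidates[0]
-- ===== SOURCE B (Python) =====
-- from typing import List, Optional, Tuple
--
-- def choose_transcript_url(
--     candidates: List[Tuple[str, Optional[str]]], prefer_types: List[str]
-- ) -> Optional[Tuple[str, Optional[str]]]:
--     """Candidate-major scan: track the best (pref-rank, index) pair."""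
--     if not candidates:
--         return None
--     if not prefer_types:
--         return candidates[0]
--     prefs = [pref.lower().strip() for pref in prefer_types]
--     best = None  # (rank, index); lexicographically smallest wins
--     for idx, (url, typ) in enumerate(candidates):
--         t_lower = typ.lower() if typ else None
--         url_lower = url.lower()
--         rank = None
--         for r, p in enumerate(prefs):
--             if (t_lower and p in t_lower) or url_lower.endswith(p):
--                 rank = r
--                 break
--         if rank is not None and (best is None or rank < best[0]):
--             best = (rank, idx)
--     return candidates[best[1]] if best is not None else candidates[0]
-- ===== Notes on version B (the rewrite author's own statement) =====
-- stated objective: alternative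
-- what changed: Inverted the loop nesting: instead of A's pref-major nested scan that returns the first candidate matching the earliest preference, B does one candidate-major pass computing each candidate's best preference rank and keeps the running minimum (rank, index) pair, returning that candidate (same fallbacks to None / candidates[0]).
import Mathlib
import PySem

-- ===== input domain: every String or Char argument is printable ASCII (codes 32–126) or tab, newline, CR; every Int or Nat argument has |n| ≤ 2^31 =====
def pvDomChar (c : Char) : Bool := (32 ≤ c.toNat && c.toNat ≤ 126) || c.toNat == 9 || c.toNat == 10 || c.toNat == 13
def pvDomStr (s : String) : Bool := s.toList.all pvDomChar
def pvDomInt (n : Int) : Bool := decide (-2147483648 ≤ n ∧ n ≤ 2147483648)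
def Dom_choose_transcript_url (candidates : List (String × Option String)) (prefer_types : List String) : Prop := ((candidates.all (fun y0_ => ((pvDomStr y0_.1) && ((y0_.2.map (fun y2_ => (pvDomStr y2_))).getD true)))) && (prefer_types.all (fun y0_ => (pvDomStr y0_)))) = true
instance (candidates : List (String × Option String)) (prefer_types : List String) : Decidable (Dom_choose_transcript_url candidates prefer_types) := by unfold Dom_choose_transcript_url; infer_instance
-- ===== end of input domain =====

-- B inverts A's nesting: candidate-major, tracking the best (pref-rank, index) pair; same return value, same cost class (alternative decomposition, not claimed faster).

-- ===== PORT A =====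
-- the match test '(t_lower and p in t_lower) or <lowered url>.endswith(p)' (identical expression in both Pythons)
def pvCond (p : String) (tl : Option String) (ulow : String) : Bool :=
  (match tl with
   | some t => !t.toList.isEmpty && PySem.Str.isIn p t
   | none => false) || PySem.Str.endswith ulow p

-- 't.lower() if t else None'
def pvLowerType : Option String → Option String
  | some t => if t.toList.isEmpty then none else some (PySem.Str.lower t)
  | none => none

-- inner 'for idx, (u, t_lower) in enumerate(lowered): …'
def aScan (candidates : List (String × Option String)) (p : String) :
    List (String × Option String) → Nat → Option (String × Option String)
  | [], _ => none
  | (u, tl) :: rest, idx =>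
    let orig := PySem.List.pyGetD candidates (idx : Int) (u, tl)
    if pvCond p tl (PySem.Str.lower orig.1) then some orig
    else aScan candidates p rest (idx + 1)

-- outer 'for pref in prefer_types: …'
def aPrefLoop (candidates lowered : List (String × Option String)) :
    List String → Option (String × Option String)
  | [] => none
  | pref :: rest =>
    let p := PySem.Str.strip (PySem.Str.lower pref)
    match aScan candidates p lowered 0 with
    | some r => some r
    | none => aPrefLoop candidates lowered rest

def choose_transcript_url (candidates : List (String × Option String)) (prefer_types : List String) : Option (String × Option String) :=
  if candidates.isEmpty then none
  else if prefer_types.isEmpty then PySem.List.pyGet? candidates 0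
  else
    let lowered := candidates.map (fun c => (c.1, pvLowerType c.2))
    match aPrefLoop candidates lowered prefer_types with
    | some r => some r
    | none => PySem.List.pyGet? candidates 0

-- ===== PORT B =====
-- inner 'for r, p in enumerate(prefs): … break'
def bRankAux (tl : Option String) (ulow : String) : List String → Nat → Option Nat
  | [], _ => none
  | p :: rest, r => if pvCond p tl ulow then some r else bRankAux tl ulow rest (r + 1)

-- outer 'for idx, (url, typ) in enumerate(candidates): …' with accumulator best
def bLoop (prefs : List String) :
    List (String × Option String) → Nat → Option (Nat × Nat) → Option (Nat × Nat)
  | [], _, best => best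
  | (u, t) :: rest, idx, best =>
    match bRankAux (pvLowerType t) (PySem.Str.lower u) prefs 0 with
    | none => bLoop prefs rest (idx + 1) best
    | some r =>
      match best with
      | none => bLoop prefs rest (idx + 1) (some (r, idx))
      | some b =>
        if r < b.1 then bLoop prefs rest (idx + 1) (some (r, idx))
        else bLoop prefs rest (idx + 1) best

def choose_transcript_url_alt (candidates : List (String × Option String)) (prefer_types : List String) : Option (String × Option String) :=
  if candidates.isEmpty then none
  else if prefer_types.isEmpty then PySem.List.pyGet? candidates 0
  else
    let prefs := prefer_types.map (fun pref => PySem.Str.strip (PySem.Str.lower pref))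
    match bLoop prefs candidates 0 none with
    | none => PySem.List.pyGet? candidates 0
    | some b => candidates[b.2]?

-- ===== PRECONDITION & SPEC =====
def Spec_choose_transcript_url (candidates : List (String × Option String)) (prefer_types : List String) (out : Option (String × Option String)) : Prop := out = choose_transcript_url_alt candidates prefer_types
instance (candidates : List (String × Option String)) (prefer_types : List String) (out : Option (String × Option String)) : Decidable (Spec_choose_transcript_url candidates prefer_types out) := by unfold Spec_choose_transcript_url; infer_instance

-- ===== CLAIM (what is proved, stated in full; the proofs are below) =====
def Claim_equal_choose_transcript_url : Prop := ∀ (candidates : List (String × Option String)) (prefer_types : List String), Dom_choose_transcript_url candidates prefer_types → Spec_choose_transcript_url candidates prefer_types (choose_transcript_url candidates prefer_types)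

-- ===== LEMMAS AND PROOFS =====

-- proof-side vocabulary
def pvMatch (p : String) (c : String × Option String) : Bool :=
  pvCond p (pvLowerType c.2) (PySem.Str.lower c.1)

def pvRank (prefs : List String) (c : String × Option String) : Option Nat :=
  bRankAux (pvLowerType c.2) (PySem.Str.lower c.1) prefs 0

-- first index achieving the minimal defined rank
def pvSel : List (Option Nat) → Option (Nat × Nat)
  | [] => none
  | none :: rest => (pvSel rest).map (fun ri => (ri.1, ri.2 + 1))
  | some r :: rest =>
    match pvSel rest with
    | none => some (r, 0)
    | some ri => if ri.1 < r then some (ri.1, ri.2 + 1) else some (r, 0)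

def pvMerge : Option (Nat × Nat) → Option (Nat × Nat) → Option (Nat × Nat)
  | none, s => s
  | some b, none => some b
  | some b, some ri => if ri.1 < b.1 then some ri else some b

lemma bRankAux_shift (tl : Option String) (ulow : String) :
    ∀ (prefs : List String) (k : Nat),
      bRankAux tl ulow prefs k = (bRankAux tl ulow prefs 0).map (· + k) := by
  intro prefs
  induction prefs with
  | nil => intro k; simp [bRankAux]
  | cons p rest ih =>
    intro k
    simp only [bRankAux]
    by_cases h : pvCond p tl ulow
    · simp [h]
    · simp [h, ih (k + 1), ih 1, Option.map_map]
      congr 1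
      funext x
      simp
      omega

lemma pvRank_cons (p : String) (prefs : List String) (c : String × Option String) :
    pvRank (p :: prefs) c =
      if pvMatch p c then some 0 else (pvRank prefs c).map (· + 1) := by
  simp only [pvRank, pvMatch, bRankAux]
  by_cases h : pvCond p (pvLowerType c.2) (PySem.Str.lower c.1)
  · rw [if_pos h, if_pos h]
  · rw [if_neg h, if_neg h]
    exact bRankAux_shift _ _ _ 1

lemma pvSel_shift (rs : List (Option Nat)) :
    pvSel (rs.map (Option.map (· + 1))) = (pvSel rs).map (fun ri => (ri.1 + 1, ri.2)) := by
  induction rs with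
  | nil => rfl
  | cons r rest ih =>
    cases r with
    | none =>
      simp only [List.map_cons, Option.map_none, pvSel, ih, Option.map_map]
      cases pvSel rest <;> rfl
    | some v =>
      simp only [List.map_cons, Option.map_some, pvSel, ih]
      cases pvSel rest with
      | none => rfl
      | some ri =>
        simp only [Option.map_some]
        by_cases h : ri.1 < v
        · simp [h]
        · simp [h]

lemma pvSel_lt_length : ∀ (rs : List (Option Nat)) (ri : Nat × Nat),
    pvSel rs = some ri → ri.2 < rs.length := by
  intro rs
  induction rs with
  | nil => intro ri h; simp [pvSel] at h
  | cons r rest ih =>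
    intro ri h
    cases r with
    | none =>
      simp only [pvSel] at h
      cases hs : pvSel rest with
      | none => rw [hs] at h; simp at h
      | some rj =>
        rw [hs] at h
        simp only [Option.map_some, Option.some.injEq] at h
        subst h
        have := ih rj hs
        simp
        omega
    | some v =>
      simp only [pvSel] at h
      cases hs : pvSel rest with
      | none =>
        rw [hs] at h
        dsimp only at h
        simp only [Option.some.injEq] at h
        subst h
        simp
      | some rj =>
        rw [hs] at h
        dsimp only at h
        by_cases hlt : rj.1 < v
        · rw [if_pos hlt] at h
          simp only [Option.some.injEq] at h
          subst h
          have := ih rj hs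
          simp
          omega
        · rw [if_neg hlt] at h
          simp only [Option.some.injEq] at h
          subst h
          simp

lemma pvSel_zero {α : Type} (g : α → Bool) (f : α → Option Nat)
    (hf : ∀ c, f c = some 0 ↔ g c = true) :
    ∀ l : List α, (∃ c ∈ l, g c = true) →
      ∃ j, pvSel (l.map f) = some (0, j) ∧ l[j]? = l.find? g := by
  intro l
  induction l with
  | nil => intro h; simp at h
  | cons c t ih =>
    intro h
    by_cases hg : g c = true
    · refine ⟨0, ?_, ?_⟩
      · have hc : f c = some 0 := (hf c).2 hg
        simp only [List.map_cons, hc, pvSel]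
        cases pvSel (t.map f) with
        | none => rfl
        | some ri => simp
      · simp [hg]
    · have ht : ∃ c ∈ t, g c = true := by
        rcases h with ⟨x, hx, hgx⟩
        rcases List.mem_cons.1 hx with rfl | hx'
        · exact absurd hgx hg
        · exact ⟨x, hx', hgx⟩
      rcases ih ht with ⟨j, hsel, hget⟩
      cases hfc : f c with
      | none =>
        refine ⟨j + 1, ?_, ?_⟩
        · simp only [List.map_cons, hfc, pvSel, hsel, Option.map_some]
        · simpa [List.find?_cons, hg] using hget
      | some r =>
        have hr : r ≠ 0 := by
          intro h0; subst h0; exact hg ((hf c).1 hfc)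
        refine ⟨j + 1, ?_, ?_⟩
        · simp only [List.map_cons, hfc, pvSel, hsel]
          have : (0 : Nat) < r := Nat.pos_of_ne_zero hr
          simp [this]
        · simpa [List.find?_cons, hg] using hget

lemma bLoop_eq (prefs : List String) :
    ∀ (l : List (String × Option String)) (idx : Nat) (best : Option (Nat × Nat)),
      bLoop prefs l idx best =
        pvMerge best ((pvSel (l.map (pvRank prefs))).map (fun ri => (ri.1, ri.2 + idx))) := by
  intro l
  induction l with
  | nil => intro idx best; cases best <;> rfl
  | cons c rest ih =>
    intro idx best
    obtain ⟨u, t⟩ := c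
    simp only [bLoop, List.map_cons]
    have hrk : bRankAux (pvLowerType t) (PySem.Str.lower u) prefs 0 = pvRank prefs (u, t) := rfl
    rw [hrk]
    cases hr : pvRank prefs (u, t) with
    | none =>
      rw [ih (idx + 1) best]
      simp only [pvSel]
      cases hs : pvSel (rest.map (pvRank prefs)) with
      | none => rfl
      | some ri =>
        simp only [Option.map_some]
        have harith : ri.2 + (idx + 1) = ri.2 + 1 + idx := by omega
        rw [harith]
    | some r =>
      simp only [pvSel]
      cases hs : pvSel (rest.map (pvRank prefs)) with
      | none =>
        cases best with
        | none =>
          dsimp only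
          rw [ih (idx + 1) (some (r, idx))]
          simp [hs, pvMerge]
        | some b =>
          dsimp only
          by_cases hlt : r < b.1
          · rw [if_pos hlt, ih (idx + 1) (some (r, idx))]
            simp [hs, pvMerge, hlt]
          · rw [if_neg hlt, ih (idx + 1) (some b)]
            simp [hs, pvMerge, hlt]
      | some ri =>
        cases best with
        | none =>
          dsimp only
          rw [ih (idx + 1) (some (r, idx))]
          simp only [hs, Option.map_some, pvMerge]
          by_cases h1 : ri.1 < r <;> simp [h1] <;> omega
        | some b =>
          dsimp only
          by_cases hlt : r < b.1
          · rw [if_pos hlt, ih (idx + 1) (some (r, idx))]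
            simp only [hs, Option.map_some, pvMerge]
            by_cases h1 : ri.1 < r
            · have h2 : ri.1 < b.1 := lt_trans h1 hlt
              simp [h1, h2]
              omega
            · simp [h1, hlt]
          · rw [if_neg hlt, ih (idx + 1) (some b)]
            simp only [hs, Option.map_some, pvMerge]
            by_cases h1 : ri.1 < r
            · by_cases h2 : ri.1 < b.1
              · simp [h1, h2]
                omega
              · simp [h1, h2]
            · have h2 : ¬ ri.1 < b.1 := by omega
              simp [h1, h2, hlt]

lemma aScan_eq (cands : List (String × Option String)) (p : String) :
    ∀ (l : List (String × Option String)) (k : Nat), cands.drop k = l →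
      aScan cands p (l.map (fun c => (c.1, pvLowerType c.2))) k = l.find? (pvMatch p) := by
  intro l
  induction l with
  | nil => intro k _; rfl
  | cons c rest ih =>
    intro k hdrop
    have hget? : cands[k]? = some c := by
      have := congrArg (fun l => l[0]?) hdrop
      simpa [List.getElem?_drop] using this
    have hpg : PySem.List.pyGetD cands (k : Int) (c.1, pvLowerType c.2) = c := by
      rw [PySem.List.pyGetD_natCast, List.getD_eq_getElem?_getD, hget?]
      rfl
    have hdrop' : cands.drop (k + 1) = rest := by
      have h1 : cands.drop (k + 1) = (cands.drop k).drop 1 := by rw [List.drop_drop]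
      rw [h1, hdrop]
      rfl
    simp only [List.map_cons, aScan]
    rw [hpg]
    by_cases hm : pvMatch p c
    · have hm' : pvCond p (pvLowerType c.2) (PySem.Str.lower c.1) = true := hm
      rw [if_pos hm', List.find?_cons_of_pos (p := pvMatch p) (l := rest) (h := hm)]
    · have hm' : ¬ pvCond p (pvLowerType c.2) (PySem.Str.lower c.1) = true := hm
      rw [if_neg hm', List.find?_cons_of_neg (p := pvMatch p) (l := rest) (h := by simpa using hm)]
      exact ih (k + 1) hdrop'

lemma aPrefLoop_eq (cands : List (String × Option String)) :
    ∀ prefs : List String,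
      aPrefLoop cands (cands.map (fun c => (c.1, pvLowerType c.2))) prefs =
        (pvSel (cands.map (pvRank (prefs.map (fun pref => PySem.Str.strip (PySem.Str.lower pref)))))).bind
          (fun ri => cands[ri.2]?) := by
  intro prefs
  induction prefs with
  | nil =>
    have h0 : ∀ c : String × Option String, pvRank [] c = none := fun _ => rfl
    simp only [aPrefLoop, List.map_nil]
    rw [List.map_congr_left (fun c _ => h0 c)]
    have hnone : ∀ l : List (String × Option String),
        pvSel (l.map (fun _ => (none : Option Nat))) = none := by
      intro l
      induction l with
      | nil => rfl
      | cons c t ih => simp only [List.map_cons, pvSel, ih, Option.map_none]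
    rw [hnone]
    rfl
  | cons pref rest ih =>
    simp only [aPrefLoop, List.map_cons]
    rw [aScan_eq cands (PySem.Str.strip (PySem.Str.lower pref)) cands 0 rfl]
    set p := PySem.Str.strip (PySem.Str.lower pref) with hp
    set R := rest.map (fun pref => PySem.Str.strip (PySem.Str.lower pref)) with hR
    cases hfind : cands.find? (pvMatch p) with
    | none =>
      have hnone : ∀ c ∈ cands, ¬ pvMatch p c = true := by
        intro c hc
        simpa using List.find?_eq_none.1 hfind c hc
      have hmap : cands.map (pvRank (p :: R)) =
          (cands.map (pvRank R)).map (Option.map (· + 1)) := by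
        rw [List.map_map]
        apply List.map_congr_left
        intro c hc
        simp only [Function.comp_apply, pvRank_cons, if_neg (hnone c hc)]
      rw [hmap, pvSel_shift, ih]
      cases pvSel (cands.map (pvRank R)) <;> rfl
    | some c =>
      have hex : ∃ x ∈ cands, pvMatch p x = true :=
        ⟨c, List.mem_of_find?_eq_some hfind, List.find?_some hfind⟩
      have hf : ∀ x, pvRank (p :: R) x = some 0 ↔ pvMatch p x = true := by
        intro x
        rw [pvRank_cons]
        by_cases hm : pvMatch p x
        · simp [hm]
        · rw [if_neg hm]
          constructor
          · intro hsome
            exfalso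
            cases hrx : pvRank R x with
            | none => rw [hrx] at hsome; simp at hsome
            | some v => rw [hrx] at hsome; simp at hsome
          · intro hgx
            exact absurd hgx hm
      rcases pvSel_zero (pvMatch p) (pvRank (p :: R)) hf cands hex with ⟨j, hsel, hget⟩
      rw [hsel]
      simp only [Option.bind_some]
      rw [hget, hfind]

-- ===== VERDICT (by name: the statement is the Claim_ definition above) =====
theorem choose_transcript_url_spec : Claim_equal_choose_transcript_url := by
  intro cands prefs _
  unfold Spec_choose_transcript_url
  by_cases hc : cands.isEmpty
  · simp [choose_transcript_url, choose_transcript_url_alt, hc]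
  · by_cases hp : prefs.isEmpty
    · simp [choose_transcript_url, choose_transcript_url_alt, hc, hp]
    · simp only [choose_transcript_url, choose_transcript_url_alt, hc, hp,
        Bool.false_eq_true, if_false]
      rw [aPrefLoop_eq, bLoop_eq]
      cases hs : pvSel (cands.map (pvRank (prefs.map (fun pref => PySem.Str.strip (PySem.Str.lower pref))))) with
      | none => rfl
      | some ri =>
        have hlt : ri.2 < cands.length := by
          simpa using pvSel_lt_length _ ri hs
        simp only [pvMerge, Option.map_some, Option.bind_some]
        simp [List.getElem?_eq_getElem hlt]
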